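-- pv_equiv track=rewrite | github.com/Life-Without-Life/is-awesome | AES.py | xor_list
-- ===== SOURCE A (Python) =====
-- def hex2bin(s):
--     mp = {'0': "0000", '1': "0001", '2': "0010", '3': "0011", '4': "0100", '5': "0101", '6': "0110", '7': "0111",
-- 		  '8': "1000", '9': "1001", 'A': "1010", 'B': "1011", 'C': "1100", 'D': "1101", 'E': "1110", 'F': "1111"}
--     bin = ""
--     for i in range(len(s)):
--         bin = bin + mp[s[i]]
--     return bin
--
-- def bin2hex(s):
-- 	mp = {"0000": '0', "0001": '1', "0010": '2', "0011": '3', "0100": '4', "0101": '5', "0110": '6', "0111": '7',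
--           "1000": '8', "1001": '9', "1010": 'A', "1011": 'B', "1100": 'C', "1101": 'D', "1110": 'E', "1111": 'F'}
-- 	hex = ""
-- 	for i in range(0, len(s), 4):
-- 		ch = "" + s[i] + s[i + 1] + s[i + 2] + s[i + 3]
-- 		hex = hex + mp[ch]
-- 	return hex
--
-- def xor_list(l):
--     l = [hex2bin(x) for x in l]
--     x = ''
--     for i in range(len(l[0])):
--         s = 0
--         for j in range(len(l)):
--             if l[j][i] == '1':
--                 s += 1
--         if s % 2 == 0:
--             x += '0'
--         else:
--             x += '1'
--     return bin2hex(x)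
-- ===== SOURCE B (Python) =====
-- def xor_list(l):
--     HEX = "0123456789ABCDEF"
--     val = {c: i for i, c in enumerate(HEX)}
--     acc = [val[c] for c in l[0]]
--     for x in l[1:]:
--         acc = [a ^ val[x[i]] for i, a in enumerate(acc)]
--     return ''.join(HEX[a] for a in acc)
-- ===== Notes on version B (the rewrite author's own statement) =====
-- stated objective: simpler
-- what changed: A expands every hex string to a binary string and, column-major per bit position, counts the '1's over all rows and takes the parity, then re-packs bits to hex; B never builds bit strings: it decodes each hex digit to its integer value 0-15, folds the rows together with pointwise integer bitwise XOR, and re-encodes the nibble values.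
import Mathlib
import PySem

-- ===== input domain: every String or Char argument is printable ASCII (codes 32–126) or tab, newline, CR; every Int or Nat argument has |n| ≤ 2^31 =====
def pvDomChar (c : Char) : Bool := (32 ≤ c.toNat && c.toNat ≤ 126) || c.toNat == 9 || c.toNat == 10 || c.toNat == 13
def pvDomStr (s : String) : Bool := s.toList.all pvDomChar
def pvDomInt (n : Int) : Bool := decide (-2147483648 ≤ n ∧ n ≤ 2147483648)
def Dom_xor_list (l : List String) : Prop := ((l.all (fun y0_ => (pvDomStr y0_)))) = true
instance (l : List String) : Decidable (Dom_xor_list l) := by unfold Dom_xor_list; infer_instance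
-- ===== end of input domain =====

-- B drops A's binary-string expansion (hex2bin / per-bit parity counting / bin2hex) entirely:
-- it decodes each hex digit to its integer value 0–15, folds the rows together with integer
-- bitwise XOR, and re-encodes.  Objective: simpler (shorter, no intermediate bit strings).
-- Equivalence is about the RETURN value; neither program mutates observable state.

-- ===== PORT A =====
-- the hex→binary dict of A's hex2bin
def mpHex : PySem.Dict Char String := PySem.Dict.ofList
  [('0',"0000"),('1',"0001"),('2',"0010"),('3',"0011"),('4',"0100"),('5',"0101"),('6',"0110"),('7',"0111"),
   ('8',"1000"),('9',"1001"),('A',"1010"),('B',"1011"),('C',"1100"),('D',"1101"),('E',"1110"),('F',"1111")]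

-- the binary→hex dict of A's bin2hex
def mpBin : PySem.Dict (List Char) Char := PySem.Dict.ofList
  [(['0','0','0','0'],'0'),(['0','0','0','1'],'1'),(['0','0','1','0'],'2'),(['0','0','1','1'],'3'),
   (['0','1','0','0'],'4'),(['0','1','0','1'],'5'),(['0','1','1','0'],'6'),(['0','1','1','1'],'7'),
   (['1','0','0','0'],'8'),(['1','0','0','1'],'9'),(['1','0','1','0'],'A'),(['1','0','1','1'],'B'),
   (['1','1','0','0'],'C'),(['1','1','0','1'],'D'),(['1','1','1','0'],'E'),(['1','1','1','1'],'F')]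

-- hex2bin: 'bin = bin + mp[s[i]]' over the characters of s; the binary intermediate is kept as
-- List Char (Lean's String append is kernel-opaque).  getD "" stands for mp[·]: exact under
-- Pre_ (a character outside the dict is a KeyError, excluded).
def hex2binA (s : String) : List Char :=
  s.toList.foldl (fun b c => b ++ (mpHex.getD c "").toList) []

-- bin2hex: groups of 4 chars looked up in mpBin, concatenated left to right.  A leftover group of
-- fewer than 4 chars is an IndexError in Python; it never occurs on hex2bin output (length 4·k),
-- the '_' arm is unreachable under Pre_.  getD '?' stands for mp[ch] (KeyError unreachable under Pre_).
def bin2hexA : List Char → List Char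
  | c1 :: c2 :: c3 :: c4 :: rest => mpBin.getD [c1, c2, c3, c4] '?' :: bin2hexA rest
  | _ => []

-- xor_list (A): column-major; for each bit position i count the '1's over all rows, emit the parity bit.
-- l[0] on an empty list is an IndexError (excluded by Pre_, headD fallback);
-- l[j][i] out of range is an IndexError (excluded by Pre_, getD ' ' fallback).
def xor_list (l : List String) : String :=
  let bl := l.map hex2binA
  let x := (List.range (bl.headD []).length).foldl
    (fun x i =>
      let s : Int := bl.foldl (fun s t => if t.getD i ' ' = '1' then s + 1 else s) 0
      x ++ [if PySem.Int.mod s 2 = 0 then '0' else '1']) []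
  String.ofList (bin2hexA x)

-- ===== PORT B =====
-- HEX = "0123456789ABCDEF"
def hexStr : List Char := "0123456789ABCDEF".toList

-- val = {c: i for i, c in enumerate(HEX)}.  The Python ints stored are the indices 0–15 and every
-- value B ever computes with them ('^') stays in 0–15, so Nat is exact here.
def hexVal : PySem.Dict Char Nat :=
  PySem.Dict.ofList ((PySem.List.enumerate hexStr).map (fun p => (p.2, p.1.toNat)))

-- xor_list (B): decode the first string to its list of nibble values (l[0] on [] is an IndexError,
-- excluded by Pre_, headD fallback; val[c] on a non-hex-digit is a KeyError, excluded by Pre_,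
-- getD 0 fallback), fold each remaining row in with pointwise integer XOR (x[i] out of range is an
-- IndexError, excluded by Pre_), and re-encode (HEX[a] with a < 16 is always in range; getD '?'
-- fallback unreachable).
def xor_list_alt (l : List String) : String :=
  let acc0 := (l.headD "").toList.map (fun c => hexVal.getD c 0)
  let acc := l.tail.foldl
    (fun acc x => (PySem.List.enumerate acc).map
      (fun p => p.2 ^^^ hexVal.getD (PySem.List.pyGetD x.toList p.1 ' ') 0)) acc0
  String.ofList (acc.map (fun a => hexStr.getD a '?'))

-- ===== PRECONDITION & SPEC =====
-- Pre_ excludes exactly the inputs where A raises: the empty list (IndexError on l[0]), a character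
-- that is not an uppercase hex digit (KeyError in hex2bin), and a later string shorter than the first
-- (IndexError on l[j][i]).
def Pre_xor_list (l : List String) : Prop :=
  l ≠ [] ∧
  (l.all (fun s => s.toList.all (fun c => hexStr.contains c))) = true ∧
  (l.all (fun s => decide ((l.headD "").toList.length ≤ s.toList.length))) = true
instance (l : List String) : Decidable (Pre_xor_list l) := by unfold Pre_xor_list; infer_instance

def pvWitness_xor_list : List String := ["1A", "F3", "07"]

def Spec_xor_list (l : List String) (out : String) : Prop := out = xor_list_alt l
instance (l : List String) (out : String) : Decidable (Spec_xor_list l out) := by unfold Spec_xor_list; infer_instance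

-- ===== CLAIM (what is proved, stated in full; the proofs are below) =====
def Claim_equal_xor_list : Prop := ∀ (l : List String), Dom_xor_list l → Pre_xor_list l → Spec_xor_list l (xor_list l)

-- ===== LEMMAS AND PROOFS =====

-- nibble value of a hex digit, and the 4-bit string of a value
def valN (c : Char) : Nat := hexVal.getD c 0
def bitc (v b : Nat) : Char := if v.testBit b then '1' else '0'
def bits4 (v : Nat) : List Char := [bitc v 3, bitc v 2, bitc v 1, bitc v 0]

lemma hexStr_eq : hexStr = ['0','1','2','3','4','5','6','7','8','9','A','B','C','D','E','F'] := by decide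

-- per-digit facts (16 cases each)
lemma nib_eq {c : Char} (hc : c ∈ hexStr) :
    (mpHex.getD c "").toList = bits4 (valN c) := by
  simp only [hexStr_eq, List.mem_cons, List.not_mem_nil, or_false] at hc
  rcases hc with h | h | h | h | h | h | h | h | h | h | h | h | h | h | h | h <;> subst h <;> decide

lemma valN_lt {c : Char} (hc : c ∈ hexStr) : valN c < 16 := by
  simp only [hexStr_eq, List.mem_cons, List.not_mem_nil, or_false] at hc
  rcases hc with h | h | h | h | h | h | h | h | h | h | h | h | h | h | h | h <;> subst h <;> decide

lemma mpBin_bits {v : Nat} (hv : v < 16) :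
    mpBin.getD (bits4 v) '?' = hexStr.getD v '?' := by
  interval_cases v <;> decide

-- hex2binA as a flatMap of nibbles
lemma hex2binA_eq (s : String) :
    hex2binA s = s.toList.flatMap (fun c => (mpHex.getD c "").toList) := by
  unfold hex2binA
  simpa using PySem.List.foldl_append_eq_flatMap (fun c => (mpHex.getD c "").toList) s.toList []

lemma flatMap_nib_congr : ∀ (cs : List Char), (∀ c ∈ cs, c ∈ hexStr) →
    cs.flatMap (fun c => (mpHex.getD c "").toList) = cs.flatMap (fun c => bits4 (valN c)) := by
  intro cs
  induction cs with
  | nil => intro _; rfl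
  | cons c cs ih =>
    intro hs
    simp only [List.flatMap_cons]
    rw [nib_eq (hs c (by simp)), ih (fun d hd => hs d (by simp [hd]))]

lemma hex2binA_eq' {s : String} (hs : ∀ c ∈ s.toList, c ∈ hexStr) :
    hex2binA s = s.toList.flatMap (fun c => bits4 (valN c)) := by
  rw [hex2binA_eq]
  exact flatMap_nib_congr s.toList hs

lemma flatMap_bits4_len (cs : List Char) :
    (cs.flatMap (fun c => bits4 (valN c))).length = 4 * cs.length := by
  induction cs with
  | nil => simp
  | cons c cs ih =>
    rw [List.flatMap_cons, List.length_append, ih]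
    simp only [bits4, List.length_cons, List.length_nil]
    omega

-- indexing into the flattened bit string: position 4k+j is bit j of digit k
lemma flat_get : ∀ (cs : List Char) (k j : Nat), k < cs.length → j < 4 →
    (cs.flatMap (fun c => bits4 (valN c))).getD (4 * k + j) ' ' = (bits4 (valN (cs.getD k ' '))).getD j ' ' := by
  intro cs
  induction cs with
  | nil => intro k j hk _; simp at hk
  | cons c cs ih =>
    intro k j hk hj
    cases k with
    | zero =>
      simp only [List.flatMap_cons, Nat.mul_zero, Nat.zero_add, List.getD_cons_zero]
      rw [List.getD_append _ _ _ _ (by simp only [bits4, List.length_cons, List.length_nil]; omega)]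
    | succ k =>
      have h4 : 4 * (k + 1) + j = (bits4 (valN c)).length + (4 * k + j) := by
        simp only [bits4, List.length_cons, List.length_nil]; ring
      rw [List.flatMap_cons, List.getD_cons_succ, h4,
        List.getD_append_right _ _ _ _ (Nat.le_add_right _ _), Nat.add_sub_cancel_left]
      exact ih k j (by simpa using hk) hj

-- the column-j count of '1's over a list of rows, and its parity character (A's output bit)
def colCnt (ts : List (List Char)) (j : Nat) : Nat :=
  ts.countP (fun t => t.getD j ' ' = '1')

def parChar (ts : List (List Char)) (j : Nat) : Char :=
  if colCnt ts j % 2 = 0 then '0' else '1'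

-- A's counting loop is countP
lemma colCnt_foldl (ts : List (List Char)) (j : Nat) :
    ts.foldl (fun s t => if t.getD j ' ' = '1' then s + 1 else s) (0 : Int) = (colCnt ts j : Int) := by
  simpa [colCnt] using PySem.List.foldl_count_if (fun t => decide (t.getD j ' ' = '1')) ts 0

-- A's output bit at column j is the parity character
lemma A_bit_eq (ts : List (List Char)) (j : Nat) :
    (if PySem.Int.mod (ts.foldl (fun s t => if t.getD j ' ' = '1' then s + 1 else s) (0 : Int)) 2 = 0
       then '0' else '1') = parChar ts j := by
  rw [colCnt_foldl]
  have h2 : ((2 : Nat) : Int) = 2 := by norm_num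
  rw [← h2, PySem.Int.mod_natCast]
  by_cases h : colCnt ts j % 2 = 0 <;> simp [parChar, h]
  omega

-- bin2hexA splits over an append at a multiple-of-4 boundary
lemma bin2hexA_append : ∀ (k : Nat) (L1 L2 : List Char), L1.length = 4 * k →
    bin2hexA (L1 ++ L2) = bin2hexA L1 ++ bin2hexA L2 := by
  intro k
  induction k with
  | zero =>
    intro L1 L2 h
    have hL : L1 = [] := List.eq_nil_of_length_eq_zero (by omega)
    subst hL; simp [bin2hexA]
  | succ k ih =>
    intro L1 L2 h
    rcases L1 with _ | ⟨a, L1⟩; · simp at h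
    rcases L1 with _ | ⟨b, L1⟩; · simp at h; omega
    rcases L1 with _ | ⟨c, L1⟩; · simp at h; omega
    rcases L1 with _ | ⟨d, L1⟩; · simp at h; omega
    simp only [List.cons_append, bin2hexA]
    rw [ih L1 L2 (by simp only [List.length_cons] at h; omega)]

-- bin2hexA on a 4n-long generated bit string groups indices four at a time
lemma bin2hexA_range : ∀ (n : Nat) (f : Nat → Char),
    bin2hexA ((List.range (4 * n)).map f) =
      (List.range n).map (fun k => mpBin.getD [f (4*k), f (4*k+1), f (4*k+2), f (4*k+3)] '?') := by
  intro n
  induction n with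
  | zero => intro f; simp [bin2hexA]
  | succ n ih =>
    intro f
    have h4 : 4 * (n + 1) = 4 * n + 1 + 1 + 1 + 1 := by ring
    have e2 : 4 * n + 1 + 1 = 4 * n + 2 := by omega
    have e3 : 4 * n + 1 + 1 + 1 = 4 * n + 3 := by omega
    rw [h4, List.range_succ, List.range_succ, List.range_succ, List.range_succ]
    simp only [List.map_append, List.map_cons, List.map_nil, List.append_assoc,
      List.cons_append, List.nil_append]
    rw [bin2hexA_append n _ _ (by simp), ih, e2, e3, List.range_succ, List.map_append]
    simp [bin2hexA]

-- parity of '1'-counts is the test bit of the XOR fold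
lemma parity_xor {α : Type} (f : α → Nat) : ∀ (ws : List α) (a : Nat) (b : Nat),
    (ws.foldl (fun x w => x ^^^ f w) a).testBit b =
      ((a.testBit b) != decide (ws.countP (fun w => (f w).testBit b) % 2 = 1)) := by
  intro ws
  induction ws with
  | nil => intro a b; simp
  | cons w ws ih =>
    intro a b
    simp only [List.foldl_cons, List.countP_cons, ih, Nat.testBit_xor]
    rcases Nat.mod_two_eq_zero_or_one (ws.countP (fun w => (f w).testBit b)) with h | h <;>
      by_cases hw : (f w).testBit b <;> by_cases ha : a.testBit b <;>
      simp [hw, ha, h, Nat.add_mod]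

-- one step of B's fold, as a pure map over indices
lemma stepB_eq (acc : List Nat) (x : String) :
    (PySem.List.enumerate acc).map
        (fun p => p.2 ^^^ hexVal.getD (PySem.List.pyGetD x.toList p.1 ' ') 0) =
      (List.range acc.length).map
        (fun k => acc.getD k 0 ^^^ valN (x.toList.getD k ' ')) := by
  apply List.ext_getElem (by simp [PySem.List.length_enumerate])
  intro k hk hk'
  have hka : k < acc.length := by simpa [PySem.List.length_enumerate] using hk
  simp [PySem.List.getElem_enumerate, valN, PySem.List.pyGetD_natCast,
    List.getD_eq_getElem?_getD, List.getElem?_eq_getElem hka]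

-- B's whole fold, columnwise
lemma foldB : ∀ (rest : List String) (acc : List Nat),
    rest.foldl (fun acc x => (PySem.List.enumerate acc).map
        (fun p => p.2 ^^^ hexVal.getD (PySem.List.pyGetD x.toList p.1 ' ') 0)) acc =
      (List.range acc.length).map
        (fun k => rest.foldl (fun a x => a ^^^ valN (x.toList.getD k ' ')) (acc.getD k 0)) := by
  intro rest
  induction rest with
  | nil =>
    intro acc
    simp only [List.foldl_nil]
    apply List.ext_getElem (by simp)
    intro k hk hk'
    simp only [List.getElem_map, List.getElem_range]
    exact (List.getD_eq_getElem _ 0 (by simpa using hk)).symm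
  | cons x rest ih =>
    intro acc
    rw [List.foldl_cons, stepB_eq, ih]
    apply List.ext_getElem (by simp)
    intro k hk hk'
    have hka : k < acc.length := by simpa using hk'
    simp only [List.getElem_map, List.getElem_range, List.foldl_cons]
    congr 1
    rw [List.getD_eq_getElem _ 0 (by simpa using hka), List.getElem_map, List.getElem_range]

-- XOR of nibbles stays a nibble
lemma foldXor_lt {rest : List String} {a : Nat} (ha : a < 16)
    (h : ∀ x ∈ rest, ∀ k, valN (x.toList.getD k ' ') < 16) (k : Nat) :
    rest.foldl (fun a x => a ^^^ valN (x.toList.getD k ' ')) a < 16 := by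
  induction rest generalizing a with
  | nil => simpa
  | cons x rest ih =>
    rw [List.foldl_cons]
    exact ih (Nat.xor_lt_two_pow (n := 4) ha (h x (by simp) k))
      (fun y hy => h y (by simp [hy]))

-- the parity character of a count C plus one more bit B, versus the XOR of B with C's parity
lemma par_char_eq (B : Bool) (C : Nat) :
    (if (C + if B = true then 1 else 0) % 2 = 0 then '0' else '1') =
      (if (B != decide (C % 2 = 1)) = true then '1' else '0') := by
  rcases Nat.mod_two_eq_zero_or_one C with h | h <;> cases B <;>
    simp [h, Nat.add_mod]

-- ===== VERDICT (by name: the statement is the Claim_ definition above) =====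
theorem xor_list_spec : Claim_equal_xor_list := by
  intro l _ hpre
  obtain ⟨hne, hhexB, hlenB⟩ := hpre
  have hhex : ∀ s ∈ l, ∀ c ∈ s.toList, c ∈ hexStr := by
    intro s hsl c hcs
    have := (List.all_eq_true.1 hhexB) s hsl
    have := (List.all_eq_true.1 this) c hcs
    simpa [List.contains_iff_mem] using this
  have hlen : ∀ s ∈ l, (l.headD "").toList.length ≤ s.toList.length := by
    intro s hsl
    simpa using (List.all_eq_true.1 hlenB) s hsl
  unfold Spec_xor_list xor_list xor_list_alt
  rcases l with _ | ⟨h, t⟩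
  · exact absurd rfl hne
  dsimp only
  simp only [List.map_cons, List.headD_cons, List.tail_cons]
  set n := h.toList.length with hn
  -- the rows as bit strings, folded to one opaque name so rewriting is syntactic
  obtain ⟨bl, hbl⟩ : ∃ b, b = hex2binA h :: List.map hex2binA t := ⟨_, rfl⟩
  -- facts about rows
  have hrowbits : ∀ s ∈ h :: t, hex2binA s = s.toList.flatMap (fun c => bits4 (valN c)) :=
    fun s hs => hex2binA_eq' (hhex s hs)
  have hlen0 : (hex2binA h).length = 4 * n := by
    rw [hrowbits h (by simp)]; exact flatMap_bits4_len _
  -- A's bit string is the parity map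
  rw [PySem.List.foldl_append_singleton_eq_map]
  simp only [List.nil_append, hlen0, ← hbl]
  have hAmap : ∀ i, (if PySem.Int.mod (bl.foldl (fun s t => if List.getD t i ' ' = '1' then s + 1 else s) (0:Int)) 2 = 0 then '0' else '1') = parChar bl i :=
    fun i => A_bit_eq bl i
  simp only [hAmap, bin2hexA_range]
  -- B's accumulator, columnwise
  rw [foldB]
  simp only [List.length_map, List.map_map, ← hn]
  -- both sides are maps over range n; compare per column k
  congr 1
  apply List.map_congr_left
  intro k hk
  have hkn : k < n := List.mem_range.1 hk
  -- per-row value at column k, and its bound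
  have hval_lt : ∀ s ∈ h :: t, valN (s.toList.getD k ' ') < 16 := by
    intro s hs
    have hks : k < s.toList.length := lt_of_lt_of_le hkn (by simpa using hlen s hs)
    rw [List.getD_eq_getElem _ ' ' hks]
    exact valN_lt (hhex s hs _ (List.getElem_mem hks))
  -- the XOR-fold value for this column
  set w := t.foldl (fun a x => a ^^^ valN (x.toList.getD k ' '))
      ((h.toList.map (fun c => hexVal.getD c 0)).getD k 0) with hw
  have hacc0 : (h.toList.map (fun c => hexVal.getD c 0)).getD k 0 = valN (h.toList.getD k ' ') := by
    rw [List.getD_eq_getElem _ 0 (by simpa using hkn), List.getElem_map,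
      List.getD_eq_getElem _ ' ' hkn]
    rfl
  have hwlt : w < 16 := by
    rw [hw, hacc0]
    exact foldXor_lt (hval_lt h (by simp))
      (fun x hx k' => by
        by_cases hks : k' < x.toList.length
        · rw [List.getD_eq_getElem _ ' ' hks]
          exact valN_lt (hhex x (by simp [hx]) _ (List.getElem_mem hks))
        · rw [List.getD_eq_default _ ' ' (by omega)]; decide) k
  -- the four parity characters of this column are the bits of w
  have hpar : ∀ j, j < 4 → parChar bl (4 * k + j) = bitc w (3 - j) := by
    intro j hj
    -- row bit at column 4k+j
    have hrow : ∀ s ∈ h :: t, (hex2binA s).getD (4 * k + j) ' ' = bitc (valN (s.toList.getD k ' ')) (3 - j) := by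
      intro s hs
      have hks : k < s.toList.length := lt_of_lt_of_le hkn (by simpa using hlen s hs)
      rw [hrowbits s hs, flat_get s.toList k j hks hj]
      interval_cases j <;> rfl
    -- count over rows = count of set bits
    have hcnt : colCnt bl (4 * k + j) =
        (h :: t).countP (fun s => (valN (s.toList.getD k ' ')).testBit (3 - j)) := by
      unfold colCnt
      rw [hbl, show hex2binA h :: List.map hex2binA t = (h :: t).map hex2binA from rfl, List.countP_map]
      apply List.countP_congr
      intro s hs
      simp only [Function.comp_apply, hrow s hs, bitc]
      by_cases hb : (valN (s.toList.getD k ' ')).testBit (3 - j) <;> simp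
    -- parity = testBit of the fold
    have hxor : w.testBit (3 - j) =
        ((valN (h.toList.getD k ' ')).testBit (3 - j) !=
          decide (t.countP (fun x => (valN (x.toList.getD k ' ')).testBit (3 - j)) % 2 = 1)) := by
      rw [hw, hacc0]
      exact parity_xor (fun x => valN (x.toList.getD k ' ')) t _ (3 - j)
    rw [List.countP_cons] at hcnt
    unfold parChar bitc
    rw [hcnt, hxor]
    exact par_char_eq _ _
  have h0 : parChar bl (4 * k) = bitc w 3 := by simpa using hpar 0 (by omega)
  have h1 : parChar bl (4 * k + 1) = bitc w 2 := by simpa using hpar 1 (by omega)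
  have h2 : parChar bl (4 * k + 2) = bitc w 1 := by simpa using hpar 2 (by omega)
  have h3 : parChar bl (4 * k + 3) = bitc w 0 := by simpa using hpar 3 (by omega)
  rw [h0, h1, h2, h3]
  show mpBin.getD (bits4 w) '?' = _
  exact mpBin_bits hwlt
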